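-- pv_equiv track=rewrite | github.com/gubanyi/competitive-programming | Need Documentation/bracket_pairing2.py | count
-- ===== SOURCE A (Python) =====
-- def match_count(c1,c2):
--
--     if (c1 in ")>}]"):
--         return 0
--
--     if (c2 in "(<{["):
--         return 0
--
--     if (c1 == "?" and c2 == "?"):
--         return 4
--
--     if (c1 == "?" or c2 == "?" or
--         c1 == "(" and ")" == c2 or
--         c1 == "{" and "}" == c2 or
--         c1 == "[" and "]" == c2 or
--         c1 == "<" and ">" == c2):
--         return 1
--
--     return 0
--
-- memo = {}
--
-- def count(s):
--     if s in memo: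
--         return memo[s]
--
--     if len(s) == 0:
--         return 1
--
--     if len(s) == 1:
--         return 0
--
--     if len(s) == 2:
--         return match_count(s[0], s[1])
--
--     c = 0
--     for k in range(1, len(s)):
--         mc = match_count(s[0], s[k])
--         if mc > 0:
--             c += count(s[1:k]) * mc * count(s[k+1:])
--
--     memo[s] = c
--     return c
-- ===== SOURCE B (Python) =====
-- PAIR = {"(": ")", "<": ">", "{": "}", "[": "]"}
--
-- def _match(c1, c2):
--     if c1 in ")>}]" or c2 in "(<{[":
--         return 0
--     if c1 == "?":
--         return 4 if c2 == "?" else 1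
--     if c2 == "?":
--         return 1
--     return 1 if PAIR.get(c1) == c2 else 0
--
-- def count(s):
--     n = len(s)
--     # bottom-up interval table; odd-length intervals always count 0, so only
--     # even lengths are filled and split points keep both sides even
--     dp = [[0] * (n + 1) for _ in range(n + 1)]
--     for i in range(n + 1):
--         dp[i][i] = 1
--     for L in range(2, n + 1, 2):
--         for i in range(n - L + 1):
--             j = i + L
--             total = 0
--             for k in range(i + 1, j, 2):
--                 m = _match(s[i], s[k])
--                 if m:
--                     total += dp[i + 1][k] * m * dp[k + 1][j]
--             dp[i][j] = total
--     return dp[0][n]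
-- ===== Notes on version B (the rewrite author's own statement) =====
-- stated objective: alternative
-- what changed: Replaces A's top-down memoized recursion on string slices (hashing a substring per state, re-slicing in the loop) by an iterative bottom-up table dp[i][j] filled by increasing even interval length, pruning to even lengths and step-2 split points since odd intervals always count 0.
import Mathlib
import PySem

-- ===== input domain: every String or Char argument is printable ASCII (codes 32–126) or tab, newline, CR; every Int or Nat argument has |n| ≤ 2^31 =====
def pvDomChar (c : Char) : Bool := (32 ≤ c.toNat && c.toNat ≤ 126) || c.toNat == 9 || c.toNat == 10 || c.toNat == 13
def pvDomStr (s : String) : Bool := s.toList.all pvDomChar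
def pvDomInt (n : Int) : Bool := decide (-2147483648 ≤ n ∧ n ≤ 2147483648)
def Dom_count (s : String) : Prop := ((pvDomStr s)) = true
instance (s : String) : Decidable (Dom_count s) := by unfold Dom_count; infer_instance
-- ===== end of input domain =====

-- B replaces A's top-down memoized recursion on string slices by an iterative bottom-up
-- interval table filled by increasing EVEN interval length with step-2 split points
-- (odd intervals always count 0); objective: alternative (iterative tabulation, parity pruning).

-- ===== PORT A =====
def pvMatchCount (c1 c2 : Char) : Int :=
  if [')', '>', '}', ']'].contains c1 then 0
  else if ['(', '<', '{', '['].contains c2 then 0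
  else if c1 = '?' ∧ c2 = '?' then 4
  else if c1 = '?' ∨ c2 = '?' ∨ (c1 = '(' ∧ c2 = ')') ∨ (c1 = '{' ∧ c2 = '}')
        ∨ (c1 = '[' ∧ c2 = ']') ∨ (c1 = '<' ∧ c2 = '>') then 1
  else 0

def pvCountFuel : Nat → List Char → Int
  | 0, _ => 0
  | f+1, cs =>
    if cs.length = 0 then 1
    else if cs.length = 1 then 0
    else if cs.length = 2 then
      pvMatchCount (PySem.List.pyGetD cs 0 ' ') (PySem.List.pyGetD cs 1 ' ')
    else
      (PySem.List.pyRange 1 (cs.length : Int) 1).foldl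
        (fun c k =>
          let mc := pvMatchCount (PySem.List.pyGetD cs 0 ' ') (PySem.List.pyGetD cs k ' ')
          if mc > 0 then
            c + pvCountFuel f (PySem.List.slice cs (some 1) (some k)) * mc *
                pvCountFuel f (PySem.List.slice cs (some (k+1)) none)
          else c) 0

def count (s : String) : Int := pvCountFuel (s.toList.length + 1) s.toList

-- ===== PORT B =====
def pvPairDict : PySem.Dict Char Char :=
  PySem.Dict.mk [('(', ')'), ('<', '>'), ('{', '}'), ('[', ']')]

def pvMatchAlt (c1 c2 : Char) : Int :=
  if [')', '>', '}', ']'].contains c1 || ['(', '<', '{', '['].contains c2 then 0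
  else if c1 = '?' then (if c2 = '?' then 4 else 1)
  else if c2 = '?' then 1
  else if pvPairDict.get? c1 = some c2 then 1 else 0

-- the 2-D array dp[·][·] is modelled as a function Int → Int → Int updated pointwise
def count_alt (s : String) : Int :=
  let cs := s.toList
  let n : Int := (cs.length : Int)
  let dp0 : Int → Int → Int := fun _ _ => 0
  let dp1 := (PySem.List.pyRange 0 (n+1) 1).foldl
      (fun dp i => fun a b => if a = i ∧ b = i then 1 else dp a b) dp0
  let dp2 := (PySem.List.pyRange 2 (n+1) 2).foldl (fun dp L =>
      (PySem.List.pyRange 0 (n - L + 1) 1).foldl (fun dp i =>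
        let j := i + L
        let total := (PySem.List.pyRange (i+1) j 2).foldl (fun t k =>
            let m := pvMatchAlt (PySem.List.pyGetD cs i ' ') (PySem.List.pyGetD cs k ' ')
            if m ≠ 0 then t + dp (i+1) k * m * dp (k+1) j else t) 0
        fun a b => if a = i ∧ b = j then total else dp a b) dp) dp1
  dp2 0 n

-- ===== PRECONDITION & SPEC =====
def Spec_count (s : String) (out : Int) : Prop := out = count_alt s
instance (s : String) (out : Int) : Decidable (Spec_count s out) := by unfold Spec_count; infer_instance

-- ===== CLAIM (what is proved, stated in full; the proofs are below) =====
def Claim_equal_count : Prop := ∀ (s : String), Dom_count s → Spec_count s (count s)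

-- ===== LEMMAS AND PROOFS =====

lemma pairIff (c1 c2 : Char) : pvPairDict.get? c1 = some c2 ↔ ((c1 = '(' ∧ c2 = ')') ∨ (c1 = '{' ∧ c2 = '}') ∨ (c1 = '[' ∧ c2 = ']') ∨ (c1 = '<' ∧ c2 = '>')) := by
  unfold pvPairDict
  simp only [PySem.Dict.get?_mk_cons]
  split_ifs <;> simp_all [PySem.Dict.get?] <;>
    first
      | (rename_i h; subst h; simp [eq_comm])
      | tauto

lemma pvMatch_eq (c1 c2 : Char) : pvMatchAlt c1 c2 = pvMatchCount c1 c2 := by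
  unfold pvMatchAlt pvMatchCount
  split_ifs <;> simp_all [pairIff] <;> tauto

lemma pyRange_two_cons (a b : Int) (h : a < b) :
    PySem.List.pyRange a b 2 = a :: PySem.List.pyRange (a+2) b 2 := by
  rw [PySem.List.pyRange_of_pos a b (by norm_num), PySem.List.pyRange_of_pos (a+2) b (by norm_num)]
  rw [if_pos h]
  by_cases h2 : a + 2 < b
  · rw [if_pos h2]
    have hm : ((b - a + 2 - 1) / 2).toNat = ((b - (a+2) + 2 - 1) / 2).toNat + 1 := by omega
    rw [hm, List.range_succ_eq_map]
    simp only [List.map_cons, List.map_map]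
    refine congrArg₂ _ (by norm_num) ?_
    apply List.map_congr_left
    intro k _
    simp [Function.comp, Nat.succ_eq_add_one]
    ring
  · rw [if_neg h2]
    have hm : ((b - a + 2 - 1) / 2).toNat = 1 := by omega
    rw [hm]
    simp

lemma pvSum_even (h : Nat → Int) (hz : ∀ k, k % 2 = 1 → h k = 0) : ∀ (m : Nat),
    ((List.range (2*m-1)).map h).sum = ((List.range m).map (fun t => h (2*t))).sum := by
  intro m
  induction m with
  | zero => simp
  | succ m ih =>
    rcases Nat.eq_zero_or_pos m with rfl | hm
    · simp
    · have e1 : 2*(m+1)-1 = (2*m-1) + 1 + 1 := by omega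
      rw [e1, List.range_succ, List.range_succ, List.map_append, List.map_append,
          List.sum_append, List.sum_append, List.range_succ, List.map_append, List.sum_append, ih]
      have hodd : h (2*m-1) = 0 := hz _ (by omega)
      have : 2*m-1+1 = 2*m := by omega
      simp [this, hodd]

lemma pvDiag_fold (l : List Int) : ∀ (d : Int → Int → Int) (a b : Int),
    (l.foldl (fun dp i => fun x y => if x = i ∧ y = i then 1 else dp x y) d) a b
      = if a = b ∧ a ∈ l then 1 else d a b := by
  induction l with
  | nil => simp
  | cons x l ih =>
    intro d a b
    simp only [List.foldl_cons, ih, List.mem_cons]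
    by_cases hab : a = b
    · subst hab
      by_cases hx : a = x
      · subst hx; simp
      · simp [hx]
    · simp [hab]
      intro h1 h2
      exact absurd (h1.trans h2.symm) hab

lemma pvFoldl_sum (l : List Int) (p : Int → Prop) [DecidablePred p] (X : Int → Int) :
    l.foldl (fun c k => if p k then c + X k else c) 0
      = (l.map (fun k => if p k then X k else 0)).sum := by
  rw [PySem.List.foldl_congr_mem l _ (fun c k => c + if p k then X k else 0) 0
      (by intro acc x _; by_cases h : p x <;> simp [h])]
  rw [PySem.List.foldl_add l (fun k => if p k then X k else 0) 0, zero_add]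

lemma pvSlice1_len (cs : List Char) (k : Int) (h1 : 1 ≤ k) (h2 : k < (cs.length : Int)) :
    PySem.List.slice cs (some 1) (some k) = (cs.drop 1).take (k.toNat - 1)
    ∧ ((cs.drop 1).take (k.toNat - 1)).length = k.toNat - 1 := by
  have hk : k = ((k.toNat : Nat) : Int) := by omega
  constructor
  · conv_lhs => rw [hk, show ((1:Int) = ((1:Nat):Int)) from rfl, PySem.List.slice_natCast]
  · simp [List.length_take, List.length_drop]; omega

lemma pvSlice2_len (cs : List Char) (k : Int) (h1 : 1 ≤ k) (h2 : k < (cs.length : Int)) :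
    PySem.List.slice cs (some (k+1)) none = cs.drop (k.toNat + 1)
    ∧ (cs.drop (k.toNat + 1)).length = cs.length - (k.toNat + 1) := by
  have hk : k + 1 = (((k.toNat + 1 : Nat)) : Int) := by omega
  constructor
  · conv_lhs => rw [hk, PySem.List.slice_from_natCast]
  · simp [List.length_drop]

lemma pvStable (ℓ : Nat) : ∀ (cs : List Char), cs.length = ℓ → ∀ (f g : Nat),
    cs.length < f → cs.length < g → pvCountFuel f cs = pvCountFuel g cs := by
  induction ℓ using Nat.strong_induction_on with
  | _ ℓ ih =>
    intro cs hlen f g hf hg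
    obtain ⟨f', rfl⟩ : ∃ f', f = f' + 1 := ⟨f - 1, by omega⟩
    obtain ⟨g', rfl⟩ : ∃ g', g = g' + 1 := ⟨g - 1, by omega⟩
    simp only [pvCountFuel]
    split_ifs with h0 h1 h2
    · rfl
    · rfl
    · rfl
    apply PySem.List.foldl_congr_mem
    intro acc k hk
    rw [PySem.List.mem_pyRange_one] at hk
    obtain ⟨hs1, hs1l⟩ := pvSlice1_len cs k hk.1 hk.2
    obtain ⟨hs2, hs2l⟩ := pvSlice2_len cs k hk.1 hk.2
    simp only [hs1, hs2]
    rw [ih (k.toNat - 1) (by omega) _ hs1l f' g' (by omega) (by omega),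
        ih (cs.length - (k.toNat + 1)) (by omega) _ hs2l f' g' (by omega) (by omega)]

lemma pvOdd (ℓ : Nat) : ∀ (cs : List Char), cs.length = ℓ → cs.length % 2 = 1 →
    ∀ (f : Nat), cs.length < f → pvCountFuel f cs = 0 := by
  induction ℓ using Nat.strong_induction_on with
  | _ ℓ ih =>
    intro cs hlen hodd f hf
    obtain ⟨f', rfl⟩ : ∃ f', f = f' + 1 := ⟨f - 1, by omega⟩
    simp only [pvCountFuel]
    by_cases hl1 : cs.length = 1
    · rw [if_neg (by omega), if_pos hl1]
    rw [if_neg (by omega), if_neg hl1, if_neg (by omega)]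
    rw [show (fun (c : Int) (k : Int) =>
          let mc := pvMatchCount (PySem.List.pyGetD cs 0 ' ') (PySem.List.pyGetD cs k ' ')
          if mc > 0 then
            c + pvCountFuel f' (PySem.List.slice cs (some 1) (some k)) * mc *
                pvCountFuel f' (PySem.List.slice cs (some (k+1)) none)
          else c)
        = (fun c k => if (pvMatchCount (PySem.List.pyGetD cs 0 ' ') (PySem.List.pyGetD cs k ' ') > 0)
            then c + pvCountFuel f' (PySem.List.slice cs (some 1) (some k)) * pvMatchCount (PySem.List.pyGetD cs 0 ' ') (PySem.List.pyGetD cs k ' ') *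
                pvCountFuel f' (PySem.List.slice cs (some (k+1)) none) else c) from rfl]
    rw [pvFoldl_sum]
    apply List.sum_eq_zero
    intro x hx
    simp only [List.mem_map] at hx
    obtain ⟨k, hk, rfl⟩ := hx
    rw [PySem.List.mem_pyRange_one] at hk
    obtain ⟨hs1, hs1l⟩ := pvSlice1_len cs k hk.1 hk.2
    obtain ⟨hs2, hs2l⟩ := pvSlice2_len cs k hk.1 hk.2
    split_ifs with hm
    · rw [hs1, hs2]
      rcases Nat.even_or_odd (k.toNat - 1) with he | ho
      · have : (cs.length - (k.toNat + 1)) % 2 = 1 := by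
          rcases he with ⟨t, ht⟩; omega
        rw [ih (cs.length - (k.toNat + 1)) (by omega) _ hs2l (by omega) f' (by omega)]
        ring
      · have : (k.toNat - 1) % 2 = 1 := by
          rcases ho with ⟨t, ht⟩; omega
        rw [ih (k.toNat - 1) (by omega) _ hs1l (by omega) f' (by omega)]
        ring
    · rfl

lemma pvMatchCount_nonneg (c1 c2 : Char) : 0 ≤ pvMatchCount c1 c2 := by
  unfold pvMatchCount; split_ifs <;> norm_num

def pvF (cs : List Char) (i j : Int) : Int :=
  pvCountFuel ((j - i).toNat + 1) ((cs.drop i.toNat).take (j - i).toNat)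

lemma pvSub_get (cs : List Char) (i j t : Nat) (h2 : j ≤ cs.length) (ht : t < j - i) (d : Char) :
    PySem.List.pyGetD ((cs.drop i).take (j - i)) (t : Int) d
      = PySem.List.pyGetD cs ((i + t : Nat) : Int) d := by
  rw [PySem.List.pyGetD_natCast, PySem.List.pyGetD_natCast]
  have hlen : ((cs.drop i).take (j - i)).length = j - i := by
    simp [List.length_take, List.length_drop]; omega
  have h1 : t < ((cs.drop i).take (j - i)).length := by omega
  have h3 : i + t < cs.length := by omega
  rw [List.getD_eq_getElem _ _ h1, List.getD_eq_getElem _ _ h3]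
  simp [List.getElem_take, List.getElem_drop]

lemma pvF_diag (cs : List Char) (i : Int) : pvF cs i i = 1 := by
  simp [pvF, pvCountFuel]

lemma pvF_rec (cs : List Char) (i j : Int) (h0 : 0 ≤ i) (hij : i + 2 ≤ j)
    (hj : j ≤ (cs.length : Int)) (he : (j - i) % 2 = 0) :
    (PySem.List.pyRange (i+1) j 2).foldl (fun t k =>
        let m := pvMatchAlt (PySem.List.pyGetD cs i ' ') (PySem.List.pyGetD cs k ' ')
        if m ≠ 0 then t + pvF cs (i+1) k * m * pvF cs (k+1) j else t) 0 = pvF cs i j := by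
  set iN := i.toNat with hiN
  set d := (j - i).toNat with hd
  have hd2 : 2 ≤ d := by omega
  have hde : d % 2 = 0 := by omega
  have hlen : iN + d ≤ cs.length := by omega
  set M := (cs.drop iN).take d with hM
  have hMlen : M.length = d := by
    simp [hM, List.length_take]; omega
  have e0 : PySem.List.pyGetD M (0 : Int) ' ' = PySem.List.pyGetD cs i ' ' := by
    have h := pvSub_get cs iN (iN + d) 0 (by omega) (by omega) ' '
    rw [show (iN + d) - iN = d by omega] at h
    rw [show ((iN + 0 : Nat) : Int) = i by omega] at h
    norm_num at h
    exact h
  -- LHS as a sum over t < d/2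
  rw [show (fun (t : Int) (k : Int) =>
        let m := pvMatchAlt (PySem.List.pyGetD cs i ' ') (PySem.List.pyGetD cs k ' ')
        if m ≠ 0 then t + pvF cs (i+1) k * m * pvF cs (k+1) j else t)
      = (fun t k => if (pvMatchAlt (PySem.List.pyGetD cs i ' ') (PySem.List.pyGetD cs k ' ') ≠ 0)
          then t + pvF cs (i+1) k * pvMatchAlt (PySem.List.pyGetD cs i ' ') (PySem.List.pyGetD cs k ' ') * pvF cs (k+1) j else t) from rfl]
  rw [pvFoldl_sum]
  rw [PySem.List.pyRange_of_pos (i+1) j (by norm_num), if_pos (by omega : i + 1 < j)]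
  rw [show ((j - (i+1) + 2 - 1) / 2).toNat = d / 2 by omega]
  rw [List.map_map]
  show _ = pvCountFuel (d + 1) M
  rcases Nat.lt_or_ge d 3 with hd3 | hd3
  · -- d = 2
    have hdd : d = 2 := by omega
    have hj2 : j = i + 2 := by omega
    simp only [pvCountFuel]
    rw [if_neg (by omega), if_neg (by omega), if_pos (show M.length = 2 by omega)]
    rw [show d / 2 = 1 by omega, List.range_one, List.map_singleton, List.sum_singleton]
    simp only [Function.comp, Nat.cast_zero, mul_zero, add_zero]
    have e1 : PySem.List.pyGetD M (1 : Int) ' ' = PySem.List.pyGetD cs (i + 1) ' ' := by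
      have h := pvSub_get cs iN (iN + d) 1 (by omega) (by omega) ' '
      rw [show (iN + d) - iN = d by omega] at h
      rw [show ((iN + 1 : Nat) : Int) = i + 1 by omega] at h
      norm_num at h
      exact h
    rw [e0, e1, pvMatch_eq, hj2, pvF_diag, show i + 1 + 1 = i + 2 by ring, pvF_diag]
    have hnn := pvMatchCount_nonneg (PySem.List.pyGetD cs i ' ') (PySem.List.pyGetD cs (i+1) ' ')
    by_cases hm : pvMatchCount (PySem.List.pyGetD cs i ' ') (PySem.List.pyGetD cs (i+1) ' ') = 0
    · rw [if_neg (not_not_intro hm), hm]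
    · rw [if_pos hm]; ring
  · -- d ≥ 3 (in fact d ≥ 4 by parity)
    simp only [pvCountFuel]
    rw [if_neg (by omega), if_neg (by omega), if_neg (by omega), hMlen]
    rw [show (fun (c : Int) (k : Int) =>
          let mc := pvMatchCount (PySem.List.pyGetD M 0 ' ') (PySem.List.pyGetD M k ' ')
          if mc > 0 then
            c + pvCountFuel d (PySem.List.slice M (some 1) (some k)) * mc *
                pvCountFuel d (PySem.List.slice M (some (k+1)) none)
          else c)
        = (fun c k => if (pvMatchCount (PySem.List.pyGetD M 0 ' ') (PySem.List.pyGetD M k ' ') > 0)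
            then c + pvCountFuel d (PySem.List.slice M (some 1) (some k)) * pvMatchCount (PySem.List.pyGetD M 0 ' ') (PySem.List.pyGetD M k ' ') *
                pvCountFuel d (PySem.List.slice M (some (k+1)) none) else c) from rfl]
    rw [pvFoldl_sum]
    rw [PySem.List.pyRange_one 1 (d : Int), show ((d : Int) - 1).toNat = d - 1 by omega]
    rw [List.map_map]
    rw [show d - 1 = 2 * (d / 2) - 1 by omega]
    rw [pvSum_even _ ?hz (d / 2)]
    case hz =>
      intro k hk
      simp only [Function.comp]
      have hcast : (1 : Int) + (k : Nat) = (((1 + k : Nat)) : Int) := by push_cast; ring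
      have hsl : PySem.List.slice M (some 1) (some ((1 : Int) + (k : Nat))) = (M.drop 1).take k := by
        rw [hcast, show (1 : Int) = ((1 : Nat) : Int) from rfl, PySem.List.slice_natCast]
        congr 1
        omega
      have hlodd : ((M.drop 1).take k).length % 2 = 1 := by
        simp [List.length_take]
        omega
      rw [hsl, pvOdd _ _ rfl hlodd d (by simp [List.length_take]; omega)]
      split_ifs
      · ring
      · rfl
    -- termwise equality over t < d/2
    congr 1
    apply List.map_congr_left
    intro t ht
    have htb : t < d / 2 := List.mem_range.mp ht
    simp only [Function.comp]
    have ekc : (1 : Int) + ((2 * t : Nat) : Int) = (((1 + 2 * t : Nat)) : Int) := by push_cast; ring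
    have ek : PySem.List.pyGetD M ((1 : Int) + ((2 * t : Nat) : Int)) ' '
        = PySem.List.pyGetD cs (i + 1 + 2 * (t : Int)) ' ' := by
      have h := pvSub_get cs iN (iN + d) (1 + 2 * t) (by omega) (by omega) ' '
      rw [show (iN + d) - iN = d by omega] at h
      rw [show ((iN + (1 + 2 * t) : Nat) : Int) = i + 1 + 2 * (t : Int) by push_cast; omega] at h
      rw [ekc]
      exact h
    have s1 : PySem.List.slice M (some 1) (some ((1 : Int) + ((2 * t : Nat) : Int)))
        = (cs.drop (iN + 1)).take (2 * t) := by
      rw [ekc, show (1 : Int) = ((1 : Nat) : Int) from rfl, PySem.List.slice_natCast]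
      rw [hM, List.drop_take, List.drop_drop, List.take_take]
      congr 1
      omega
    have s2 : PySem.List.slice M (some ((1 : Int) + ((2 * t : Nat) : Int) + 1)) none
        = (cs.drop (iN + (2 * t + 2))).take (d - (2 * t + 2)) := by
      rw [show (1 : Int) + ((2 * t : Nat) : Int) + 1 = (((2 * t + 2 : Nat)) : Int) by push_cast; ring,
          PySem.List.slice_from_natCast]
      rw [hM, List.drop_take, List.drop_drop]

    have b1 : pvF cs (i + 1) (i + 1 + 2 * (t : Int))
        = pvCountFuel d ((cs.drop (iN + 1)).take (2 * t)) := by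
      unfold pvF
      rw [show (i + 1 + 2 * (t : Int) - (i + 1)).toNat = 2 * t by omega,
          show (i + 1).toNat = iN + 1 by omega]
      apply pvStable _ _ rfl <;> (simp [List.length_take]; try omega)
    have b2 : pvF cs (i + 1 + 2 * (t : Int) + 1) j
        = pvCountFuel d ((cs.drop (iN + (2 * t + 2))).take (d - (2 * t + 2))) := by
      unfold pvF
      rw [show (j - (i + 1 + 2 * (t : Int) + 1)).toNat = d - (2 * t + 2) by omega,
          show (i + 1 + 2 * (t : Int) + 1).toNat = iN + (2 * t + 2) by omega]
      apply pvStable _ _ rfl <;> (simp [List.length_take]; try omega)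
    rw [e0, ek, pvMatch_eq, s1, s2, b1, b2]
    have hnn := pvMatchCount_nonneg (PySem.List.pyGetD cs i ' ')
        (PySem.List.pyGetD cs (i + 1 + 2 * (t : Int)) ' ')
    split_ifs with hc1 hc2 hc2
    · rfl
    · omega
    · omega
    · rfl

def pvGood (cs : List Char) (dp : Int → Int → Int) (L : Int) : Prop :=
  (∀ i j : Int, 0 ≤ i → i ≤ j → j ≤ (cs.length : Int) → (j - i) % 2 = 0 → j - i ≤ L →
      dp i j = pvF cs i j)
  ∧ (∀ i j : Int, (j - i) % 2 = 1 → dp i j = 0)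

lemma pvMid (cs : List Char) (L : Int) (hL2 : 2 ≤ L) (hLe : L % 2 = 0) (fuel : Nat) :
    ∀ (a : Int), 0 ≤ a → ((cs.length : Int) - L + 1 - a).toNat = fuel →
    ∀ (dp : Int → Int → Int), pvGood cs dp (L - 2) →
    (∀ i : Int, 0 ≤ i → i < a → dp i (i + L) = pvF cs i (i + L)) →
    pvGood cs ((PySem.List.pyRange a ((cs.length : Int) - L + 1) 1).foldl (fun dp i =>
        let j := i + L
        let total := (PySem.List.pyRange (i+1) j 2).foldl (fun t k =>
            let m := pvMatchAlt (PySem.List.pyGetD cs i ' ') (PySem.List.pyGetD cs k ' ')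
            if m ≠ 0 then t + dp (i+1) k * m * dp (k+1) j else t) 0
        fun a b => if a = i ∧ b = j then total else dp a b) dp) L := by
  induction fuel with
  | zero =>
    intro a ha hfuel dp hGood hDone
    rw [PySem.List.pyRange_one_eq_nil (by omega)]
    simp only [List.foldl_nil]
    constructor
    · intro i j hi hij hjn hpar hle
      by_cases hsmall : j - i ≤ L - 2
      · exact hGood.1 i j hi hij hjn hpar hsmall
      · have hjiL : j - i = L := by omega
        have : j = i + L := by omega
        subst this
        exact hDone i hi (by omega)
    · exact hGood.2
  | succ fuel ih =>
    intro a ha hfuel dp hGood hDone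
    rw [PySem.List.pyRange_one_cons (by omega)]
    simp only [List.foldl_cons]
    -- the value written at (a, a+L) is pvF cs a (a+L)
    have hbound : a + L ≤ (cs.length : Int) := by omega
    have htotal : (PySem.List.pyRange (a+1) (a+L) 2).foldl (fun t k =>
        let m := pvMatchAlt (PySem.List.pyGetD cs a ' ') (PySem.List.pyGetD cs k ' ')
        if m ≠ 0 then t + dp (a+1) k * m * dp (k+1) (a+L) else t) 0 = pvF cs a (a + L) := by
      rw [PySem.List.foldl_congr_mem _ _ (fun t k =>
          let m := pvMatchAlt (PySem.List.pyGetD cs a ' ') (PySem.List.pyGetD cs k ' ')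
          if m ≠ 0 then t + pvF cs (a+1) k * m * pvF cs (k+1) (a+L) else t) 0 ?congr]
      · exact pvF_rec cs a (a + L) ha (by omega) hbound (by omega)
      case congr =>
        intro acc k hk
        rw [PySem.List.mem_pyRange_iff_of_pos (by norm_num)] at hk
        obtain ⟨hk1, hk2, hk3⟩ := hk
        obtain ⟨u, hu⟩ := hk3
        have d1 : dp (a+1) k = pvF cs (a+1) k :=
          hGood.1 (a+1) k (by omega) (by omega) (by omega) (by omega) (by omega)
        have d2 : dp (k+1) (a+L) = pvF cs (k+1) (a+L) :=
          hGood.1 (k+1) (a+L) (by omega) (by omega) (by omega) (by omega) (by omega)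
        simp only [d1, d2]
    have := ih (a + 1) (by omega) (by omega)
        (fun x y => if x = a ∧ y = a + L then
            (PySem.List.pyRange (a+1) (a+L) 2).foldl (fun t k =>
              let m := pvMatchAlt (PySem.List.pyGetD cs a ' ') (PySem.List.pyGetD cs k ' ')
              if m ≠ 0 then t + dp (a+1) k * m * dp (k+1) (a+L) else t) 0
          else dp x y) ?good ?done
    · exact this
    case good =>
      constructor
      · intro i j hi hij hjn hpar hle
        beta_reduce
        rw [if_neg (by rintro ⟨rfl, rfl⟩; omega)]
        exact hGood.1 i j hi hij hjn hpar hle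
      · intro i j hpar
        beta_reduce
        rw [if_neg (by rintro ⟨rfl, rfl⟩; omega)]
        exact hGood.2 i j hpar
    case done =>
      intro i hi hia
      by_cases hieq : i = a
      · subst hieq
        beta_reduce
        rw [if_pos ⟨rfl, rfl⟩, htotal]
      · beta_reduce
        rw [if_neg (by rintro ⟨rfl, -⟩; exact hieq rfl)]
        exact hDone i hi (by omega)

lemma pvOuter (cs : List Char) (fuel : Nat) : ∀ (a : Int), 2 ≤ a → a % 2 = 0 →
    ((cs.length : Int) + 1 - a).toNat ≤ fuel →
    ∀ (dp : Int → Int → Int), pvGood cs dp (a - 2) →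
    pvGood cs ((PySem.List.pyRange a ((cs.length : Int)+1) 2).foldl (fun dp L =>
        (PySem.List.pyRange 0 ((cs.length : Int) - L + 1) 1).foldl (fun dp i =>
          let j := i + L
          let total := (PySem.List.pyRange (i+1) j 2).foldl (fun t k =>
              let m := pvMatchAlt (PySem.List.pyGetD cs i ' ') (PySem.List.pyGetD cs k ' ')
              if m ≠ 0 then t + dp (i+1) k * m * dp (k+1) j else t) 0
          fun a b => if a = i ∧ b = j then total else dp a b) dp) dp)
      ((cs.length : Int)) := by
  induction fuel with
  | zero =>
    intro a ha2 hae hfuel dp hGood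
    rw [PySem.List.pyRange_of_pos a _ (by norm_num), if_neg (by omega)]
    simp only [List.range_zero, List.map_nil, List.foldl_nil]
    constructor
    · intro i j hi hij hjn hpar hle
      exact hGood.1 i j hi hij hjn hpar (by omega)
    · exact hGood.2
  | succ fuel ih =>
    intro a ha2 hae hfuel dp hGood
    by_cases hend : (cs.length : Int) + 1 ≤ a
    · rw [PySem.List.pyRange_of_pos a _ (by norm_num), if_neg (by omega)]
      simp only [List.range_zero, List.map_nil, List.foldl_nil]
      constructor
      · intro i j hi hij hjn hpar hle
        exact hGood.1 i j hi hij hjn hpar (by omega)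
      · exact hGood.2
    · rw [pyRange_two_cons a _ (by omega)]
      simp only [List.foldl_cons]
      have hmid := pvMid cs a ha2 hae ((cs.length : Int) - a + 1).toNat 0 le_rfl (by omega) dp
          hGood (by intro i hi hia; omega)
      exact ih (a + 2) (by omega) (by omega) (by omega) _
        (by constructor
            · intro i j hi hij hjn hpar hle
              exact hmid.1 i j hi hij hjn hpar (by omega)
            · exact hmid.2)

-- ===== VERDICT (by name: the statement is the Claim_ definition above) =====
theorem count_spec : Claim_equal_count := by
  intro s _
  unfold Spec_count count count_alt
  simp only
  set cs := s.toList with hcs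
  have hGood1 : pvGood cs ((PySem.List.pyRange 0 ((cs.length : Int)+1) 1).foldl
      (fun dp i => fun a b => if a = i ∧ b = i then 1 else dp a b) (fun _ _ => 0)) 0 := by
    constructor
    · intro i j hi hij hjn hpar hle
      have hij' : i = j := by omega
      subst hij'
      rw [pvDiag_fold, if_pos ⟨rfl, PySem.List.mem_pyRange_one.mpr ⟨hi, by omega⟩⟩, pvF_diag]
    · intro i j hpar
      rw [pvDiag_fold, if_neg (by rintro ⟨rfl, -⟩; omega)]
  have hOut := pvOuter cs ((cs.length : Int) + 1 - 2).toNat 2 le_rfl (by norm_num)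
      (by omega) _ (by simpa using hGood1)
  by_cases hpar : cs.length % 2 = 0
  · have hfin := hOut.1 0 (cs.length : Int) le_rfl (by positivity) le_rfl (by omega) (by omega)
    rw [hfin]
    unfold pvF
    simp
  · have hfin := hOut.2 0 (cs.length : Int) (by omega)
    rw [hfin, pvOdd cs.length cs rfl (by omega) (cs.length + 1) (by omega)]
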